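-- pv_equiv track=rewrite | github.com/kasalehi/lessmills_mac | outreach_paused.py | _pick_primary_reason
-- ===== SOURCE A (Python) =====
-- def _pick_primary_reason(reasons: str) -> str:
--     """
--     Pick a single primary reason from the pipe-delimited string using severity order.
--     (Limited to reasons that can appear with your 4-column dataset.)
--     """
--     severity = ["drought_streak", "negative_momentum", "erratic_usage", "paused_state", "none"]
--     parts = [x.strip() for x in str(reasons).split("|") if x and x.strip()]
--     if not parts:
--         return "none"
--     for r in severity:
--         if r in parts:
--             return r
--     return parts[0]
-- ===== SOURCE B (Python) =====
-- def _pick_primary_reason(reasons: str) -> str: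
--     """Pick the highest-severity reason via a rank table and a single min-scan over the parts."""
--     rank = {"drought_streak": 0, "negative_momentum": 1, "erratic_usage": 2,
--             "paused_state": 3, "none": 4}
--     parts = [x.strip() for x in str(reasons).split("|") if x and x.strip()]
--     if not parts:
--         return "none"
--     best = None
--     for p in parts:
--         r = rank.get(p)
--         if r is not None and (best is None or r < best[0]):
--             best = (r, p)
--     return best[1] if best is not None else parts[0]
-- ===== Notes on version B (the rewrite author's own statement) =====
-- stated objective: alternative
-- what changed: Instead of scanning the fixed severity list and testing membership of each name in parts, B precomputes a name-to-rank dict and makes one pass over parts keeping the part of minimum rank.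
import Mathlib
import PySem

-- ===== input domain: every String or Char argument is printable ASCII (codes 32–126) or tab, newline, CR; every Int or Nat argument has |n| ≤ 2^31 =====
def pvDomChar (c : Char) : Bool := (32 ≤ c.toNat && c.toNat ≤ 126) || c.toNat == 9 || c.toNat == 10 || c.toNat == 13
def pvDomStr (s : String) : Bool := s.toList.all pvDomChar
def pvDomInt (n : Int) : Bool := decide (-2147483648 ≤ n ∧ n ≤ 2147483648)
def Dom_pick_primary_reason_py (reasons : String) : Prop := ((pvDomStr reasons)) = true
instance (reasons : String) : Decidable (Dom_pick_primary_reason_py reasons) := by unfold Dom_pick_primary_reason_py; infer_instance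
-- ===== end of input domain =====

-- B replaces A's scan of the fixed severity list (membership test per severity) by a
-- rank table and a single minimum-rank pass over the parsed parts; objective: alternative.

-- ===== PORT A =====
-- parsing line shared verbatim by both Pythons:
-- parts = [x.strip() for x in str(reasons).split("|") if x and x.strip()]
-- (split? returns none only for an empty separator; "|" ≠ "", so .getD [] is never taken)
def pvParts (reasons : String) : List String :=
  (((PySem.Str.split? reasons "|").getD []).filter
      (fun x => x != "" && PySem.Str.strip x != "")).map PySem.Str.strip

-- A's loop: for r in severity: if r in parts: return r
def pickLoopA : List String → List String → Option String
  | [], _ => none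
  | r :: rest, parts => if parts.contains r then some r else pickLoopA rest parts

def pick_primary_reason_py (reasons : String) : String :=
  let severity : List String :=
    ["drought_streak", "negative_momentum", "erratic_usage", "paused_state", "none"]
  let parts := pvParts reasons
  if parts = [] then "none"
  else
    match pickLoopA severity parts with
    | some r => r
    | none => (PySem.List.pyGet? parts 0).getD ""   -- parts[0]; parts ≠ [] here

-- ===== PORT B =====
def pvRank : PySem.Dict String Int :=
  PySem.Dict.ofList [("drought_streak", 0), ("negative_momentum", 1),
    ("erratic_usage", 2), ("paused_state", 3), ("none", 4)]

-- one loop iteration: r = rank.get(p); if r is not None and (best is None or r < best[0]): best = (r, p)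
def pvStep (acc : Option (Int × String)) (p : String) : Option (Int × String) :=
  match PySem.Dict.get? pvRank p with
  | none => acc
  | some r =>
    match acc with
    | none => some (r, p)
    | some (rb, _) => if r < rb then some (r, p) else acc

def pick_primary_reason_py_alt (reasons : String) : String :=
  let parts := pvParts reasons
  if parts = [] then "none"
  else
    match parts.foldl pvStep none with
    | some (_, s) => s
    | none => (PySem.List.pyGet? parts 0).getD ""   -- parts[0]; parts ≠ [] here

-- ===== PRECONDITION & SPEC =====
def Spec_pick_primary_reason_py (reasons : String) (out : String) : Prop := out = pick_primary_reason_py_alt reasons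
instance (reasons : String) (out : String) : Decidable (Spec_pick_primary_reason_py reasons out) := by unfold Spec_pick_primary_reason_py; infer_instance

-- ===== CLAIM (what is proved, stated in full; the proofs are below) =====
def Claim_equal_pick_primary_reason_py : Prop := ∀ (reasons : String), Dom_pick_primary_reason_py reasons → Spec_pick_primary_reason_py reasons (pick_primary_reason_py reasons)

-- ===== LEMMAS AND PROOFS =====

-- left-biased minimum on optional (rank, name) pairs: pvStep acc p = pvMin acc (rank entry of p)
def pvMin (a b : Option (Int × String)) : Option (Int × String) :=
  match b with
  | none => a
  | some (rb, sb) =>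
    match a with
    | none => some (rb, sb)
    | some (ra, _) => if rb < ra then some (rb, sb) else a

def pvRk (p : String) : Option (Int × String) :=
  (PySem.Dict.get? pvRank p).map (fun r => (r, p))

lemma pvStep_eq_min (acc : Option (Int × String)) (p : String) :
    pvStep acc p = pvMin acc (pvRk p) := by
  unfold pvStep pvMin pvRk
  cases PySem.Dict.get? pvRank p with
  | none => cases acc <;> rfl
  | some r => cases acc with
    | none => rfl
    | some q => cases q; simp

lemma pvMin_none_left (b : Option (Int × String)) : pvMin none b = b := by
  cases b with
  | none => rfl
  | some q => cases q; rfl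

lemma pvMin_assoc (a b c : Option (Int × String)) :
    pvMin (pvMin a b) c = pvMin a (pvMin b c) := by
  rcases c with _ | ⟨rc, sc⟩
  · rfl
  rcases b with _ | ⟨rb, sb⟩
  · rfl
  rcases a with _ | ⟨ra, sa⟩
  · simp [pvMin_none_left]
  · by_cases h1 : rb < ra <;> by_cases h2 : rc < rb <;> by_cases h3 : rc < ra <;>
      simp [pvMin, h1, h2, h3] <;> omega

lemma foldl_step_min (l : List String) :
    ∀ acc, l.foldl pvStep acc = pvMin acc (l.foldl pvStep none) := by
  induction l with
  | nil => intro acc; cases acc <;> rfl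
  | cons p l ih =>
    intro acc
    rw [List.foldl_cons, List.foldl_cons, pvStep_eq_min acc p, pvStep_eq_min none p,
      pvMin_none_left, ih (pvMin acc (pvRk p)), ih (pvRk p), pvMin_assoc]

-- the first-severity-present chain, with an explicit (rank, name) answer
def pvChain (l : List String) : Option (Int × String) :=
  if l.contains "drought_streak" then some (0, "drought_streak")
  else if l.contains "negative_momentum" then some (1, "negative_momentum")
  else if l.contains "erratic_usage" then some (2, "erratic_usage")
  else if l.contains "paused_state" then some (3, "paused_state")
  else if l.contains "none" then some (4, "none")
  else none

lemma pvRk_eq (p : String) :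
    pvRk p = if p = "drought_streak" then some (0, p)
      else if p = "negative_momentum" then some (1, p)
      else if p = "erratic_usage" then some (2, p)
      else if p = "paused_state" then some (3, p)
      else if p = "none" then some (4, p)
      else none := by
  unfold pvRk pvRank
  simp [PySem.Dict.ofList, PySem.Dict.update, PySem.Dict.get?_insert]
  split_ifs <;> simp_all

lemma foldB_eq_chain (l : List String) : l.foldl pvStep none = pvChain l := by
  induction l with
  | nil => rfl
  | cons p l ih =>
    rw [List.foldl_cons, pvStep_eq_min, pvMin_none_left, foldl_step_min, ih]
    by_cases h0 : p = "drought_streak" <;> by_cases h1 : p = "negative_momentum" <;>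
      by_cases h2 : p = "erratic_usage" <;> by_cases h3 : p = "paused_state" <;>
      by_cases h4 : p = "none" <;>
    simp_all [pvRk_eq, pvChain, pvMin] <;>
      split_ifs <;> simp_all

lemma loopA_eq_chain (parts : List String) :
    pickLoopA ["drought_streak", "negative_momentum", "erratic_usage", "paused_state", "none"]
      parts = (pvChain parts).map (·.2) := by
  simp only [pickLoopA, pvChain]
  split_ifs <;> rfl

-- ===== VERDICT (by name: the statement is the Claim_ definition above) =====
theorem pick_primary_reason_py_spec : Claim_equal_pick_primary_reason_py := by
  intro reasons _
  unfold Spec_pick_primary_reason_py pick_primary_reason_py pick_primary_reason_py_alt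
  simp only [foldB_eq_chain, loopA_eq_chain]
  cases pvChain (pvParts reasons) with
  | none => rfl
  | some q => cases q; rfl
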